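-- pv_equiv track=rewrite | github.com/Yushi-Y/Leetcode | Huawei/Q2_leetcode_style/连通网络节点和_DFS_subgraph_max_weights.py | dfs
-- ===== SOURCE A (Python) =====
-- def dfs(start_idx, adj, weights, visited):
--     """Return (max_total_weight, node_idx_with_max_weight)"""
--     visited[start_idx] = True
--     total_weight = weights[start_idx]
--     max_idx = start_idx
--
--     neighbor_idxs = adj[start_idx]
--     for neighbor_idx in neighbor_idxs:
--         if not visited[neighbor_idx]:
--             new_weight, new_max_idx = dfs(neighbor_idx, adj, weights, visited)
--             total_weight += new_weight
--             if weights[new_max_idx] > weights[max_idx]: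
--                 max_idx = new_max_idx
--
--     return total_weight, max_idx
-- ===== SOURCE B (Python) =====
-- def dfs(start_idx, adj, weights, visited):
--     """Return (max_total_weight, node_idx_with_max_weight)"""
--     # Phase 1: collect the DFS preorder with an explicit stack of pending
--     # neighbor lists (marks the same nodes in `visited` as the recursive version).
--     visited[start_idx] = True
--     order = [start_idx]
--     stack = [list(adj[start_idx])]
--     while stack:
--         top = stack[-1]
--         if not top:
--             stack.pop()
--             continue
--         nb = top.pop(0)
--         if not visited[nb]:
--             visited[nb] = True
--             order.append(nb)
--             stack.append(list(adj[nb]))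
--     # Phase 2: aggregate over the preorder.
--     total = 0
--     for i in order:
--         total += weights[i]
--     best = order[0]
--     for i in order[1:]:
--         if weights[i] > weights[best]:
--             best = i
--     return (total, best)
-- ===== Notes on version B (the rewrite author's own statement) =====
-- stated objective: alternative
-- what changed: The recursive DFS that accumulates (sum, argmax) on the way back up is replaced by an iterative two-phase pass: an explicit stack of pending neighbour lists collects the DFS preorder, then the total weight and the first node of maximal weight are computed by two simple folds over that list.
-- outside the precondition, e.g. on dfs(0, [[], [5]], [1, 1], [False, False]): A returns (1, 0), B returns (1, 0); on dfs(0, [[]], [5], [False, False]): A returns (5, 0), B returns (5, 0)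
import Mathlib
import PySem

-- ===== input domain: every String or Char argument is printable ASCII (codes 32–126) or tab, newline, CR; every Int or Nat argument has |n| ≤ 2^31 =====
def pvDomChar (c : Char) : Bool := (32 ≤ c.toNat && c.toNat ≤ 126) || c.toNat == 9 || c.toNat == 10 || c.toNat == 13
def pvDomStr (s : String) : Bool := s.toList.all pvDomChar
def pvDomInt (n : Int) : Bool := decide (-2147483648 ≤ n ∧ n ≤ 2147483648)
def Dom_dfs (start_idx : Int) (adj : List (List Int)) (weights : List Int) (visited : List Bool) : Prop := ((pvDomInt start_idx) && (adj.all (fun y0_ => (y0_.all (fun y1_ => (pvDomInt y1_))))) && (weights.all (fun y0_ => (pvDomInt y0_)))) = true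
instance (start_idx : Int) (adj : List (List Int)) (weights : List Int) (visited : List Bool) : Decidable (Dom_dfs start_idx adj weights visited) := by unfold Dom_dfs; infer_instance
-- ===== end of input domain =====

-- B re-implements the recursive weight-summing DFS as an iterative two-phase pass (explicit
-- stack collecting the DFS preorder, then aggregation); equivalence is about the RETURN value
-- (both Pythons mutate `visited` the same way, marking exactly the visited nodes).

-- shared Python-primitive helpers: xs[i] reads (default only reachable outside Pre_) and visited[i] = True
def wG (w : List Int) (i : Int) : Int := PySem.List.pyGetD w i 0
def aG (adj : List (List Int)) (i : Int) : List Int := PySem.List.pyGetD adj i []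
def gB (v : List Bool) (i : Int) : Bool := PySem.List.pyGetD v i true
def sB (v : List Bool) (i : Int) : List Bool :=
  match PySem.List.pyIdx? v.length i with
  | some k => v.set k true
  | none => v

-- ===== PORT A =====
-- literal port of A: recursive DFS threading the mutated `visited`; the fuel only makes the
-- mutual recursion total (each recursive call flips a False entry, so `visited.length + 1` never runs out)
mutual
def dfsA (fuel : Nat) (s : Int) (adj : List (List Int)) (w : List Int) (v : List Bool) :
    (Int × Int) × List Bool :=
  match fuel with
  | 0 => ((0, s), v)
  | Nat.succ f => loopA f adj w (aG adj s) (wG w s) s (sB v s)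
  termination_by (fuel, 0)
def loopA (f : Nat) (adj : List (List Int)) (w : List Int) (l : List Int)
    (tw mi : Int) (v : List Bool) : (Int × Int) × List Bool :=
  match l with
  | [] => ((tw, mi), v)
  | nb :: rest =>
    if gB v nb = false then
      let r := dfsA f nb adj w v
      loopA f adj w rest (tw + r.1.1) (if wG w r.1.2 > wG w mi then r.1.2 else mi) r.2
    else loopA f adj w rest tw mi v
  termination_by (f, l.length + 1)
end

def dfs (start_idx : Int) (adj : List (List Int)) (weights : List Int) (visited : List Bool) : Int × Int :=
  (dfsA (visited.length + 1) start_idx adj weights visited).1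

-- ===== PORT B =====
-- Source B's while-loop: stack of pending neighbour lists; pops the head of the top list, visits
-- unvisited nodes, pushes their adjacency list; the fuel bound only makes the loop total
def machB (fuel : Nat) (adj : List (List Int)) (stack : List (List Int)) (v : List Bool)
    (ord : List Int) : List Int × List Bool :=
  match fuel, stack with
  | 0, _ => (ord, v)
  | Nat.succ _, [] => (ord, v)
  | Nat.succ f, [] :: rest => machB f adj rest v ord
  | Nat.succ f, (nb :: tl) :: rest =>
    if gB v nb = false then
      machB f adj (aG adj nb :: tl :: rest) (sB v nb) (ord ++ [nb])
    else machB f adj (tl :: rest) v ord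

def totLen (adj : List (List Int)) : Nat := (adj.map List.length).sum

def dfs_alt (start_idx : Int) (adj : List (List Int)) (weights : List Int) (visited : List Bool) : Int × Int :=
  let vis1 := sB visited start_idx
  let fuel := visited.length * (totLen adj + 2) + (aG adj start_idx).length + 3
  let p := machB fuel adj [aG adj start_idx] vis1 [start_idx]
  let total := p.1.foldl (fun a i => a + wG weights i) 0
  let best := match p.1 with
    | [] => start_idx
    | b :: t => t.foldl (fun m i => if wG weights i > wG weights m then i else m) b
  (total, best)

-- ===== PRECONDITION & SPEC =====
-- Pre_ excludes inputs where Python A raises an IndexError (start or a neighbour index outside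
-- visited's range, or adj/weights shorter than needed); it conservatively requires adj and
-- weights to be at least visited's length and ALL adjacency entries in visited's range, which
-- also excludes some inputs where A happens to return because a short list or an out-of-range
-- entry is never reached (see claim cites).
def Pre_dfs (start_idx : Int) (adj : List (List Int)) (weights : List Int) (visited : List Bool) : Prop :=
  visited.length ≤ weights.length ∧ visited.length ≤ adj.length ∧
  (-(visited.length : Int) ≤ start_idx ∧ start_idx < (visited.length : Int)) ∧
  ∀ l ∈ adj, ∀ j ∈ l, -(visited.length : Int) ≤ j ∧ j < (visited.length : Int)
instance (start_idx : Int) (adj : List (List Int)) (weights : List Int) (visited : List Bool) : Decidable (Pre_dfs start_idx adj weights visited) := by unfold Pre_dfs; infer_instance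

def pvWitness_dfs : Int × List (List Int) × List Int × List Bool := (0, [[1], [0]], [1, 2], [false, false])

def Spec_dfs (start_idx : Int) (adj : List (List Int)) (weights : List Int) (visited : List Bool) (out : Int × Int) : Prop := out = dfs_alt start_idx adj weights visited
instance (start_idx : Int) (adj : List (List Int)) (weights : List Int) (visited : List Bool) (out : Int × Int) : Decidable (Spec_dfs start_idx adj weights visited out) := by unfold Spec_dfs; infer_instance

-- ===== CLAIM (what is proved, stated in full; the proofs are below) =====
def Claim_equal_dfs : Prop := ∀ (start_idx : Int) (adj : List (List Int)) (weights : List Int) (visited : List Bool), Dom_dfs start_idx adj weights visited → Pre_dfs start_idx adj weights visited → Spec_dfs start_idx adj weights visited (dfs start_idx adj weights visited)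

-- ===== LEMMAS AND PROOFS =====

-- common spec: the DFS preorder list (svS) with the updated visited flags; fuelled like the ports
mutual
def svS (fuel : Nat) (adj : List (List Int)) (s : Int) (v : List Bool) : List Int × List Bool :=
  match fuel with
  | 0 => ([], v)
  | Nat.succ f =>
    let p := sfS f adj (aG adj s) (sB v s)
    (s :: p.1, p.2)
  termination_by (fuel, 0)
def sfS (f : Nat) (adj : List (List Int)) (l : List Int) (v : List Bool) : List Int × List Bool :=
  match l with
  | [] => ([], v)
  | nb :: rest =>
    if gB v nb = false then
      let p := svS f adj nb v
      let q := sfS f adj rest p.2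
      (p.1 ++ q.1, q.2)
    else sfS f adj rest v
  termination_by (f, l.length + 1)
end

def cf (v : List Bool) : Nat := v.count false
def swF (w : List Int) (l : List Int) : Int := (l.map (wG w)).sum
def fmF (w : List Int) (m : Int) (l : List Int) : Int :=
  l.foldl (fun m i => if wG w i > wG w m then i else m) m

lemma cf_le_len (v : List Bool) : cf v ≤ v.length := List.count_le_length

lemma cf_set_le (v : List Bool) (k : Nat) : cf (v.set k true) ≤ cf v := by
  induction v generalizing k with
  | nil => simp
  | cons b t ih =>
    cases k with
    | zero => cases b <;> simp [cf] at * <;> omega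
    | succ k =>
      have := ih k
      cases b <;> simp [cf] at * <;> omega

lemma cf_set_false (v : List Bool) (k : Nat) (h : v[k]? = some false) :
    cf (v.set k true) + 1 = cf v := by
  induction v generalizing k with
  | nil => simp at h
  | cons b t ih =>
    cases k with
    | zero => simp at h; subst h; simp [cf]
    | succ k =>
      simp at h
      have := ih k h
      cases b <;> simp [cf] at * <;> omega

lemma cf_set_lt_len (v : List Bool) (k : Nat) (h : k < v.length) :
    cf (v.set k true) < v.length := by
  induction v generalizing k with
  | nil => simp at h
  | cons b t ih =>
    cases k with
    | zero =>
      have := cf_le_len t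
      simp [cf] at *; omega
    | succ k =>
      simp at h
      have := ih k h
      cases b <;> simp [cf] at * <;> omega

lemma gB_false (v : List Bool) (i : Int) (h : gB v i = false) :
    ∃ k, PySem.List.pyIdx? v.length i = some k ∧ v[k]? = some false := by
  unfold gB PySem.List.pyGetD PySem.List.pyGet? at h
  cases hk : PySem.List.pyIdx? v.length i with
  | none => rw [hk] at h; simp at h
  | some k =>
    rw [hk] at h
    simp only [Option.bind_some] at h
    cases hv : v[k]? with
    | none => rw [hv] at h; simp at h
    | some b =>
      rw [hv] at h; simp at h; subst h
      exact ⟨k, rfl, hv⟩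

lemma sB_eq_set (v : List Bool) (i : Int) (k : Nat)
    (h : PySem.List.pyIdx? v.length i = some k) : sB v i = v.set k true := by
  unfold sB; rw [h]

lemma cf_sB_le (v : List Bool) (i : Int) : cf (sB v i) ≤ cf v := by
  unfold sB; cases h : PySem.List.pyIdx? v.length i with
  | none => exact le_refl _
  | some k => exact cf_set_le v k

lemma cf_sB_succ (v : List Bool) (i : Int) (h : gB v i = false) :
    cf (sB v i) + 1 = cf v := by
  obtain ⟨k, hk, hv⟩ := gB_false v i h
  rw [sB_eq_set v i k hk]
  exact cf_set_false v k hv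

lemma pyIdx_of_range (n : Nat) (i : Int) (h1 : -(n : Int) ≤ i) (h2 : i < (n : Int)) :
    ∃ k, PySem.List.pyIdx? n i = some k ∧ k < n := by
  unfold PySem.List.pyIdx?
  by_cases h0 : 0 ≤ i
  · refine ⟨i.toNat, by simp [h0, h2], by omega⟩
  · refine ⟨n - (-i).toNat, by simp [h0, h1], by omega⟩

lemma cf_sB_lt_len (v : List Bool) (i : Int)
    (h1 : -(v.length : Int) ≤ i) (h2 : i < (v.length : Int)) :
    cf (sB v i) < v.length := by
  obtain ⟨k, hk, hlt⟩ := pyIdx_of_range v.length i h1 h2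
  rw [sB_eq_set v i k hk]
  exact cf_set_lt_len v k hlt

-- monotonicity: the spec never un-visits a node
mutual
theorem mono_sv (fuel : Nat) (adj : List (List Int)) (s : Int) (v : List Bool) :
    cf (svS fuel adj s v).2 ≤ cf v := by
  match fuel with
  | 0 => simp [svS]
  | Nat.succ f =>
    have h1 := mono_sf f adj (aG adj s) (sB v s)
    have h2 : cf (sB v s) ≤ cf v := cf_sB_le v s
    simp only [svS]
    omega
  termination_by (fuel, 0)
theorem mono_sf (f : Nat) (adj : List (List Int)) (l : List Int) (v : List Bool) :
    cf (sfS f adj l v).2 ≤ cf v := by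
  match l with
  | [] => simp [sfS]
  | nb :: rest =>
    by_cases h : gB v nb = false
    · have h1 := mono_sv f adj nb v
      have h2 := mono_sf f adj rest (svS f adj nb v).2
      simp only [sfS, h, if_pos]
      omega
    · have h2 := mono_sf f adj rest v
      simp only [sfS, h]
      simpa [h] using h2
  termination_by (f, l.length + 1)
end

-- with enough fuel the spec's value does not depend on the fuel
mutual
theorem st_sv (fuel fuel' : Nat) (adj : List (List Int)) (s : Int) (v : List Bool)
    (h : cf (sB v s) + 2 ≤ fuel) (h' : cf (sB v s) + 2 ≤ fuel') :
    svS fuel adj s v = svS fuel' adj s v := by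
  match fuel, fuel' with
  | Nat.succ f, Nat.succ f' =>
    have := st_sf f f' adj (aG adj s) (sB v s) (by omega) (by omega)
    simp only [svS, this]
  termination_by (fuel, 0)
theorem st_sf (f f' : Nat) (adj : List (List Int)) (l : List Int) (v : List Bool)
    (h : cf v + 1 ≤ f) (h' : cf v + 1 ≤ f') :
    sfS f adj l v = sfS f' adj l v := by
  match l with
  | [] => simp [sfS]
  | nb :: rest =>
    by_cases hg : gB v nb = false
    · have hcf := cf_sB_succ v nb hg
      have h1 : svS f adj nb v = svS f' adj nb v :=
        st_sv f f' adj nb v (by omega) (by omega)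
      have hm : cf (svS f adj nb v).2 + 1 ≤ cf v := by
        obtain ⟨g, rfl⟩ : ∃ g, f = g + 1 := ⟨f - 1, by omega⟩
        have := mono_sf g adj (aG adj nb) (sB v nb)
        simp only [svS]
        omega
      have h2 : sfS f adj rest (svS f adj nb v).2 = sfS f' adj rest (svS f adj nb v).2 :=
        st_sf f f' adj rest (svS f adj nb v).2 (by omega) (by omega)
      simp only [sfS]
      rw [if_pos hg, if_pos hg, ← h1, h2]
    · have h2 := st_sf f f' adj rest v h h'
      simp only [sfS]
      rw [if_neg hg, if_neg hg, h2]
  termination_by (f, l.length + 1)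
end

-- first-max "tournament" law: folding the strict-improvement rule over a block equals
-- comparing the block's own first maximum against the accumulator once
lemma fm_cons (w : List Int) (t : List Int) (a m : Int) :
    fmF w m (a :: t) = if wG w (fmF w a t) > wG w m then fmF w a t else m := by
  induction t generalizing a m with
  | nil => simp [fmF]
  | cons b t ih =>
    simp only [fmF, List.foldl_cons] at *
    rw [ih b]; rw [ih b a]
    split_ifs <;> omega

lemma fm_append (w : List Int) (m : Int) (l1 l2 : List Int) :
    fmF w m (l1 ++ l2) = fmF w (fmF w m l1) l2 := by
  simp [fmF, List.foldl_append]

lemma sw_cons (w : List Int) (a : Int) (l : List Int) : swF w (a :: l) = wG w a + swF w l := by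
  simp [swF]

lemma sw_append (w : List Int) (l1 l2 : List Int) : swF w (l1 ++ l2) = swF w l1 + swF w l2 := by
  simp [swF]

-- A's recursion computes exactly (sum, first-max, visited) of the spec preorder
theorem LAfold (adj : List (List Int)) (w : List Int) :
    ∀ (f : Nat) (l : List Int) (tw mi : Int) (v : List Bool), cf v + 1 ≤ f →
    loopA f adj w l tw mi v =
      ((tw + swF w (sfS f adj l v).1, fmF w mi (sfS f adj l v).1), (sfS f adj l v).2) := by
  intro f
  induction f using Nat.strong_induction_on with
  | _ f ihf =>
    intro l
    induction l with
    | nil => intro tw mi v h; simp [loopA, sfS, swF, fmF]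
    | cons nb rest ihl =>
      intro tw mi v h
      by_cases hg : gB v nb = false
      · have hcf := cf_sB_succ v nb hg
        obtain ⟨g, rfl⟩ : ∃ g, f = g + 1 := ⟨f - 1, by omega⟩
        have hA : dfsA (g + 1) nb adj w v =
            ((wG w nb + swF w (sfS g adj (aG adj nb) (sB v nb)).1,
              fmF w nb (sfS g adj (aG adj nb) (sB v nb)).1),
             (sfS g adj (aG adj nb) (sB v nb)).2) := by
          have := ihf g (by omega) (aG adj nb) (wG w nb) nb (sB v nb) (by omega)
          simp only [dfsA, this]
        have hm : cf (sfS g adj (aG adj nb) (sB v nb)).2 + 1 ≤ cf v := by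
          have := mono_sf g adj (aG adj nb) (sB v nb)
          omega
        have hrest := ihl (tw + (wG w nb + swF w (sfS g adj (aG adj nb) (sB v nb)).1))
          (if wG w (fmF w nb (sfS g adj (aG adj nb) (sB v nb)).1) > wG w mi
            then fmF w nb (sfS g adj (aG adj nb) (sB v nb)).1 else mi)
          (sfS g adj (aG adj nb) (sB v nb)).2 (by omega)
        simp only [loopA]
        rw [if_pos hg, hA, hrest]
        conv_rhs => simp only [sfS]
        rw [if_pos hg]
        simp only [svS, Prod.mk.injEq]
        refine ⟨⟨?_, ?_⟩, trivial⟩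
        · rw [sw_append, sw_cons]; ring
        · rw [fm_append, fm_cons w (sfS g adj (aG adj nb) (sB v nb)).1 nb mi]
      · have hrest := ihl tw mi v h
        simp only [loopA]
        rw [if_neg hg, hrest]
        conv_rhs => simp only [sfS]
        rw [if_neg hg]

theorem LA (g : Nat) (adj : List (List Int)) (w : List Int) (s : Int) (v : List Bool)
    (h : cf (sB v s) + 1 ≤ g) :
    dfsA (g + 1) s adj w v =
      ((wG w s + swF w (sfS g adj (aG adj s) (sB v s)).1,
        fmF w s (sfS g adj (aG adj s) (sB v s)).1),
       (sfS g adj (aG adj s) (sB v s)).2) := by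
  have := LAfold adj w g (aG adj s) (wG w s) s (sB v s) h
  simp only [dfsA, this]

-- B's stack machine computes the concatenated spec preorders of the pending lists
def msS (adj : List (List Int)) : List (List Int) → List Bool → List Int → List Int × List Bool
  | [], v, ord => (ord, v)
  | l :: S, v, ord =>
    let p := sfS (cf v + 1) adj l v
    msS adj S p.2 (ord ++ p.1)

def meas (adj : List (List Int)) (S : List (List Int)) (v : List Bool) : Nat :=
  cf v * (totLen adj + 2) + (S.map (fun l => l.length + 1)).sum

lemma len_aG_le (adj : List (List Int)) (i : Int) : (aG adj i).length ≤ totLen adj := by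
  unfold aG PySem.List.pyGetD
  cases hg : PySem.List.pyGet? adj i with
  | none => simp
  | some l =>
    have hm : l ∈ adj := PySem.List.mem_of_pyGet?_eq_some adj hg
    simp only [Option.getD_some]
    exact List.single_le_sum (by simp) _ (List.mem_map_of_mem hm)

theorem LB (f : Nat) (adj : List (List Int)) (S : List (List Int)) (v : List Bool)
    (ord : List Int) (h : meas adj S v < f) :
    machB f adj S v ord = msS adj S v ord := by
  induction f generalizing S v ord with
  | zero => omega
  | succ f ih =>
    match S with
    | [] => simp [machB, msS]
    | [] :: rest =>
      have hm2 : meas adj rest v < f := by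
        simp only [meas, List.map_cons, List.sum_cons, List.length_nil] at h
        simp only [meas]
        omega
      simp only [machB, msS, sfS, ih rest v ord hm2, List.append_nil]
    | (nb :: tl) :: rest =>
      by_cases hg : gB v nb = false
      · have hcf := cf_sB_succ v nb hg
        have hlen : (aG adj nb).length ≤ totLen adj := len_aG_le adj nb
        have hm : meas adj (aG adj nb :: tl :: rest) (sB v nb) < f := by
          simp only [meas, List.map_cons, List.sum_cons, List.length_cons] at h ⊢
          rw [← hcf] at h
          simp only [Nat.add_mul, Nat.one_mul] at h
          omega
        have hstep := ih (aG adj nb :: tl :: rest) (sB v nb) (ord ++ [nb]) hm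
        simp only [machB]
        rw [if_pos hg, hstep]
        -- unfold one visit on the spec side
        have hmono := mono_sf (cf v) adj (aG adj nb) (sB v nb)
        have hst : sfS (cf v + 1) adj tl (sfS (cf v) adj (aG adj nb) (sB v nb)).2
            = sfS (cf (sfS (cf v) adj (aG adj nb) (sB v nb)).2 + 1) adj tl
                (sfS (cf v) adj (aG adj nb) (sB v nb)).2 :=
          st_sf _ _ adj tl _ (by omega) (by omega)
        simp only [msS, sfS]
        rw [if_pos hg]
        simp only [svS]
        rw [hcf]
        rw [hst]
        simp [List.append_assoc]
      · have hm2 : meas adj (tl :: rest) v < f := by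
          simp only [meas, List.map_cons, List.sum_cons, List.length_cons] at h ⊢; omega
        have hstep := ih (tl :: rest) v ord hm2
        simp only [machB]
        rw [if_neg hg, hstep]
        simp only [msS, sfS]
        rw [if_neg hg]

lemma foldl_addw (w : List Int) (l : List Int) (c : Int) :
    l.foldl (fun a i => a + wG w i) c = c + swF w l := by
  induction l generalizing c with
  | nil => simp [swF]
  | cons a t ih => simp [ih, sw_cons]; ring

-- ===== VERDICT (by name: the statement is the Claim_ definition above) =====
theorem dfs_spec : Claim_equal_dfs := by
  intro s adj w v _hdom hpre
  obtain ⟨_hw, _ha, ⟨hs1, hs2⟩, _hadj⟩ := hpre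
  unfold Spec_dfs
  simp only [dfs, dfs_alt]
  have hn : cf (sB v s) < v.length := cf_sB_lt_len v s hs1 hs2
  have hA := LA v.length adj w s v (by omega)
  have hmeas : meas adj [aG adj s] (sB v s) <
      v.length * (totLen adj + 2) + (aG adj s).length + 3 := by
    have h1 : cf (sB v s) ≤ v.length := by omega
    have : cf (sB v s) * (totLen adj + 2) ≤ v.length * (totLen adj + 2) :=
      Nat.mul_le_mul_right _ h1
    simp only [meas, List.map_cons, List.map_nil, List.sum_cons, List.sum_nil]
    omega
  have hB := LB _ adj [aG adj s] (sB v s) [s] hmeas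
  rw [hB]
  have hst : sfS (cf (sB v s) + 1) adj (aG adj s) (sB v s)
      = sfS v.length adj (aG adj s) (sB v s) :=
    st_sf _ _ adj _ _ (by omega) (by omega)
  simp only [msS, hst]
  rw [hA]
  simp only [List.singleton_append, List.foldl_cons]
  rw [foldl_addw]
  simp [fmF]
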